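-- pv_equiv track=rewrite | github.com/Rai220/anima | epoch_2/generation_3/self_randomness.py | sequence_to_blocks
-- ===== SOURCE A (Python) =====
-- def sequence_to_blocks(seq, block_size):
--     """Разбивает последовательность на блоки."""
--     n = len(seq) - 2 * block_size + 1
--     past_blocks = []
--     future_blocks = []
--     for i in range(n):
--         past = tuple(seq[i:i+block_size])
--         future = tuple(seq[i+block_size:i+2*block_size])
--         past_blocks.append(past)
--         future_blocks.append(future)
--     return past_blocks, future_blocks
-- ===== SOURCE B (Python) =====
-- def sequence_to_blocks(seq, block_size):
--     """Разбивает последовательность на блоки."""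
--     past_blocks, future_blocks = [], []
--     buf = []
--     for x in seq:
--         buf.append(x)
--         if len(buf) == 2 * block_size:
--             past_blocks.append(tuple(buf[:block_size]))
--             future_blocks.append(tuple(buf[block_size:]))
--             buf.pop(0)
--     return past_blocks, future_blocks
-- ===== Notes on version B (the rewrite author's own statement) =====
-- stated objective: alternative
-- what changed: B is a single streaming pass over the elements with a sliding buffer of the last 2*block_size items, emitting a (past,future) pair each time the buffer fills and dropping its head, instead of A's index loop that slices the sequence twice per iteration.
-- outside the precondition, e.g. on sequence_to_blocks([0], 0): A returns ([(), ()], [(), ()]), B returns ([], [])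
import Mathlib
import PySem

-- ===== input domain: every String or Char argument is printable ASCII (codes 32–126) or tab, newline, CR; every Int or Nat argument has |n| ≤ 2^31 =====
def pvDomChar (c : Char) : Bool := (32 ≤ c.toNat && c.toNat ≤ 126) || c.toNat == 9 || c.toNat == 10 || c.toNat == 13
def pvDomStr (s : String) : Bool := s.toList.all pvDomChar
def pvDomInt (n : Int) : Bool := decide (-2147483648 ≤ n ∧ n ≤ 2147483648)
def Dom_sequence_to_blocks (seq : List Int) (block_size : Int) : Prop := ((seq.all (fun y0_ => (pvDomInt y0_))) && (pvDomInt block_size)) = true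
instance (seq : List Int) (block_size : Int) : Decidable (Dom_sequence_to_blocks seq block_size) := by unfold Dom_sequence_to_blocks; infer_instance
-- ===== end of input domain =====

-- B replaces A's index loop (two slices of seq per iteration) by a single streaming
-- pass over the elements with a sliding buffer of the last 2*block_size items,
-- emitting a (past, future) pair whenever the buffer fills (a different decomposition,
-- not faster).

-- ===== PORT A =====
def sequence_to_blocks (seq : List Int) (block_size : Int) : List (List Int) × List (List Int) :=
  let n : Int := (seq.length : Int) - 2 * block_size + 1
  (PySem.List.pyRange 0 n 1).foldl
    (fun (acc : List (List Int) × List (List Int)) i =>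
      let past := PySem.List.slice seq (some i) (some (i + block_size))
      let future := PySem.List.slice seq (some (i + block_size)) (some (i + 2 * block_size))
      (acc.1 ++ [past], acc.2 ++ [future]))
    ([], [])

-- ===== PORT B =====
-- the body of B's for-loop as a named step function; state = (past_blocks, future_blocks, buf)
def stbStep (block_size : Int) (st : List (List Int) × List (List Int) × List Int) (x : Int) :
    List (List Int) × List (List Int) × List Int :=
  let buf := st.2.2 ++ [x]
  if (buf.length : Int) = 2 * block_size then
    (st.1 ++ [PySem.List.slice buf none (some block_size)],
     st.2.1 ++ [PySem.List.slice buf (some block_size) none],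
     buf.drop 1)   -- buf.pop(0): removes the first element (buf is nonempty here), exact
  else
    (st.1, st.2.1, buf)

def sequence_to_blocks_alt (seq : List Int) (block_size : Int) : List (List Int) × List (List Int) :=
  let st := seq.foldl (stbStep block_size) ([], [], [])
  (st.1, st.2.1)

-- ===== PRECONDITION & SPEC =====
-- Pre_ excludes block_size ≤ 0 (no natural meaning for a window size): A still returns
-- there, but only accidental values of Python's slice arithmetic (e.g. len+1 empty
-- tuples for block_size = 0), while B's buffer never reaches length 2*block_size and
-- it returns ([], []); see claim.json cites.
def Pre_sequence_to_blocks (seq : List Int) (block_size : Int) : Prop := 1 ≤ block_size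
instance (seq : List Int) (block_size : Int) : Decidable (Pre_sequence_to_blocks seq block_size) := by unfold Pre_sequence_to_blocks; infer_instance
def pvWitness_sequence_to_blocks : List Int × Int := ([1, 2, 3, 4, 5, 6, 7], 2)

def Spec_sequence_to_blocks (seq : List Int) (block_size : Int) (out : List (List Int) × List (List Int)) : Prop := out = sequence_to_blocks_alt seq block_size
instance (seq : List Int) (block_size : Int) (out : List (List Int) × List (List Int)) : Decidable (Spec_sequence_to_blocks seq block_size out) := by unfold Spec_sequence_to_blocks; infer_instance

-- ===== CLAIM (what is proved, stated in full; the proofs are below) =====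
def Claim_equal_sequence_to_blocks : Prop := ∀ (seq : List Int) (block_size : Int), Dom_sequence_to_blocks seq block_size → Pre_sequence_to_blocks seq block_size → Spec_sequence_to_blocks seq block_size (sequence_to_blocks seq block_size)

-- ===== LEMMAS AND PROOFS =====

-- the closed-form state of B's loop after processing a prefix p
def stbState (nb : Nat) (p : List Int) : List (List Int) × List (List Int) × List Int :=
  ((List.range (p.length + 1 - 2 * nb)).map (fun i => (p.drop i).take nb),
   (List.range (p.length + 1 - 2 * nb)).map (fun i => (p.drop (i + nb)).take nb),
   p.drop (p.length + 1 - 2 * nb))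

theorem stb_step_eq (nb : Nat) (hnb : 1 ≤ nb) (p : List Int) (x : Int) :
    stbStep (nb : Int) (stbState nb p) x = stbState nb (p ++ [x]) := by
  unfold stbStep stbState
  by_cases hc : 2 * nb ≤ p.length + 1
  · set m := p.length + 1 - 2 * nb with hm
    have hmle : m ≤ p.length := by omega
    have hlen : (p.drop m ++ [x]).length = 2 * nb := by
      simp [List.length_drop]; omega
    rw [if_pos (by exact_mod_cast congrArg (Nat.cast (R := Int)) hlen)]
    dsimp only
    have hdroplen : (p.drop m).length = 2 * nb - 1 := by simp [List.length_drop]; omega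
    have hb : ((nb : Int)).toNat = nb := by omega
    simp only [Prod.mk.injEq]
    refine ⟨?_, ?_, ?_⟩
    · -- past blocks
      have hrange : (p ++ [x]).length + 1 - 2 * nb = m + 1 := by simp; omega
      rw [hrange, List.range_succ, List.map_append, List.map_singleton]
      congr 1
      · apply List.map_congr_left
        intro i hi
        have hi' : i < m := List.mem_range.mp hi
        rw [List.drop_append_of_le_length (by omega), List.take_append_of_le_length (by simp [List.length_drop]; omega)]
      · rw [PySem.List.slice_to_natCast]
        congr 1
        rw [List.take_append_of_le_length (by omega),
            List.drop_append_of_le_length hmle,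
            List.take_append_of_le_length (by omega)]
    · -- future blocks
      have hrange : (p ++ [x]).length + 1 - 2 * nb = m + 1 := by simp; omega
      rw [hrange, List.range_succ, List.map_append, List.map_singleton]
      congr 1
      · apply List.map_congr_left
        intro i hi
        have hi' : i < m := List.mem_range.mp hi
        rw [List.drop_append_of_le_length (by omega), List.take_append_of_le_length (by simp [List.length_drop]; omega)]
      · rw [PySem.List.slice_from_natCast]
        congr 1
        rw [List.drop_append_of_le_length (by omega), List.drop_drop,
            List.drop_append_of_le_length (by omega),
            List.take_of_length_le (by simp [List.length_drop]; omega)]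
    · -- buffer
      rw [List.drop_append_of_le_length (by omega), List.drop_drop,
          show (p ++ [x]).length + 1 - 2 * nb = 1 + m by simp; omega,
          List.drop_append_of_le_length (by omega), Nat.add_comm 1 m]
  · -- buffer not yet full
    have hm0 : p.length + 1 - 2 * nb = 0 := by omega
    rw [hm0]
    have hlen : ((p.drop 0 ++ [x]).length : Int) ≠ 2 * (nb : Int) := by
      simp; omega
    rw [if_neg hlen]
    dsimp only
    have hm1 : (p ++ [x]).length + 1 - 2 * nb = 0 := by simp; omega
    rw [hm1]
    simp

theorem stb_inv (nb : Nat) (hnb : 1 ≤ nb) (rest : List Int) : ∀ (pre : List Int),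
    List.foldl (stbStep (nb : Int)) (stbState nb pre) rest = stbState nb (pre ++ rest) := by
  induction rest with
  | nil => intro pre; simp
  | cons x rest ih =>
      intro pre
      rw [List.foldl_cons, stb_step_eq nb hnb pre x, ih (pre ++ [x]), List.append_assoc]
      rfl

theorem alt_closed (seq : List Int) (nb : Nat) (hnb : 1 ≤ nb) :
    sequence_to_blocks_alt seq (nb : Int) =
      ((List.range (seq.length + 1 - 2 * nb)).map (fun i => (seq.drop i).take nb),
       (List.range (seq.length + 1 - 2 * nb)).map (fun i => (seq.drop (i + nb)).take nb)) := by
  have h0 : stbState nb ([] : List Int) = ([], [], []) := by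
    unfold stbState
    simp [show 0 + 1 - 2 * nb = 0 by omega]
  have := stb_inv nb hnb seq []
  rw [h0] at this
  simp only [sequence_to_blocks_alt, List.nil_append] at this ⊢
  rw [this]
  rfl

theorem a_closed (seq : List Int) (nb : Nat) :
    sequence_to_blocks seq (nb : Int) =
      ((List.range (seq.length + 1 - 2 * nb)).map (fun i => (seq.drop i).take nb),
       (List.range (seq.length + 1 - 2 * nb)).map (fun i => (seq.drop (i + nb)).take nb)) := by
  simp only [sequence_to_blocks]
  rw [PySem.List.foldl_prod_mk
        (f := fun acc i => acc ++ [PySem.List.slice seq (some i) (some (i + (nb : Int)))])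
        (g := fun acc i => acc ++ [PySem.List.slice seq (some (i + (nb : Int))) (some (i + 2 * (nb : Int)))]),
      PySem.List.foldl_append_singleton_eq_map, PySem.List.foldl_append_singleton_eq_map,
      PySem.List.pyRange_one]
  have hn : (((seq.length : Int) - 2 * (nb : Int) + 1) - 0).toNat = seq.length + 1 - 2 * nb := by omega
  rw [hn, List.map_map, List.map_map]
  simp only [Prod.mk.injEq]
  refine ⟨?_, ?_⟩
  · apply List.map_congr_left
    intro k _
    simp only [Function.comp_apply, zero_add]
    rw [PySem.List.slice_natCast_add]
  · apply List.map_congr_left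
    intro k _
    simp only [Function.comp_apply, zero_add]
    rw [show ((k : Int) + nb) = (((k + nb : Nat) : Int)) by push_cast; ring,
        show ((k : Int) + 2 * nb) = (((k + nb : Nat) : Int)) + ((nb : Nat) : Int) by push_cast; ring,
        PySem.List.slice_natCast_add]

-- ===== VERDICT (by name: the statement is the Claim_ definition above) =====
theorem sequence_to_blocks_spec : Claim_equal_sequence_to_blocks := by
  intro seq b _ hb
  have hb' : (1 : Int) ≤ b := hb
  have hbn : b = ((b.toNat : Nat) : Int) := by omega
  have h1 : 1 ≤ b.toNat := by omega
  show sequence_to_blocks seq b = sequence_to_blocks_alt seq b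
  rw [hbn, a_closed seq b.toNat, alt_closed seq b.toNat h1]
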